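-- pv_equiv track=rewrite | github.com/y1135972876-afk/Dataset-Collection | script/Train_v2/train/split_data.py | _plan_balance_sentences
-- ===== SOURCE A (Python) =====
-- from typing import List, Tuple, Dict, Any
--
-- def _safe_sent_count(item: Dict[str, Any]) -> int:
--     sents = item.get("sentences", [])
--     return len(sents) if isinstance(sents, list) else 0
--
-- def _paper_sentence_size(groups: "OrderedDict[str, List[Dict[str, Any]]]", paper_name: str) -> int:
--     return sum(_safe_sent_count(x) for x in groups[paper_name])
--
-- def _plan_balance_sentences(groups: "OrderedDict[str, List[Dict[str, Any]]]", k: int) -> List[List[str]]: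
--     """按句子数贪心均衡（不拆 paper，尽量让每份句子数接近）。"""
--     papers = list(groups.keys())
--     n = len(papers)
--     k = max(1, min(k, n))
--     sized = [(p, _paper_sentence_size(groups, p)) for p in papers]
--     sized.sort(key=lambda x: x[1], reverse=True)
--     shards, loads = [[] for _ in range(k)], [0]*k
--     for p, sz in sized:
--         i = min(range(k), key=lambda j: loads[j])
--         shards[i].append(p)
--         loads[i] += sz
--     return shards
-- ===== SOURCE B (Python) =====
-- from typing import List, Dict, Any
--
-- def _safe_sent_count(item: Dict[str, Any]) -> int:
--     sents = item.get("sentences", [])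
--     return len(sents) if isinstance(sents, list) else 0
--
-- def _paper_sentence_size(groups, paper_name: str) -> int:
--     return sum(_safe_sent_count(x) for x in groups[paper_name])
--
-- def _push(queue, entry):
--     # binary search for the first slot whose (load, shard index) is not below
--     # entry's, then insert there: the queue stays sorted by (load, shard index)
--     key = (entry[0], entry[1])
--     lo, hi = 0, len(queue)
--     while lo < hi:
--         mid = (lo + hi) // 2
--         if (queue[mid][0], queue[mid][1]) < key:
--             lo = mid + 1
--         else:
--             hi = mid
--     queue.insert(lo, entry)
--     return queue
--
-- def _plan_balance_sentences(groups, k: int) -> List[List[str]]: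
--     # The shards live inside the priority queue itself: each entry is
--     # (load, shard index, papers), and the queue is kept sorted by
--     # (load, shard index).  Pop the head (least-loaded shard, lowest index on
--     # ties), grow it, push it back via binary search; finally read the paper
--     # lists back in shard-index order.  No separate loads/shards arrays and no
--     # k-wide min scan per paper.
--     papers = list(groups.keys())
--     k = max(1, min(k, len(papers)))
--     sized = sorted(((p, _paper_sentence_size(groups, p)) for p in papers),
--                    key=lambda t: t[1], reverse=True)
--     queue = [(0, j, []) for j in range(k)]
--     for p, sz in sized:
--         load, j, members = queue.pop(0)
--         members.append(p)
--         queue = _push(queue, (load + sz, j, members))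
--     return [m for _, _, m in sorted(queue, key=lambda t: t[1])]
-- ===== Notes on version B (the rewrite author's own statement) =====
-- stated objective: faster
-- what changed: Replaces A's separate shards/loads arrays and per-paper min(range(k), key=...) lambda-keyed scan with a single priority queue sorted by (load, shard index) whose entries carry the shard contents themselves: pop the head in O(1), grow it, re-insert it with a hand-written binary search plus list.insert, and read the shards off by a final sort on shard index.
import Mathlib
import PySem

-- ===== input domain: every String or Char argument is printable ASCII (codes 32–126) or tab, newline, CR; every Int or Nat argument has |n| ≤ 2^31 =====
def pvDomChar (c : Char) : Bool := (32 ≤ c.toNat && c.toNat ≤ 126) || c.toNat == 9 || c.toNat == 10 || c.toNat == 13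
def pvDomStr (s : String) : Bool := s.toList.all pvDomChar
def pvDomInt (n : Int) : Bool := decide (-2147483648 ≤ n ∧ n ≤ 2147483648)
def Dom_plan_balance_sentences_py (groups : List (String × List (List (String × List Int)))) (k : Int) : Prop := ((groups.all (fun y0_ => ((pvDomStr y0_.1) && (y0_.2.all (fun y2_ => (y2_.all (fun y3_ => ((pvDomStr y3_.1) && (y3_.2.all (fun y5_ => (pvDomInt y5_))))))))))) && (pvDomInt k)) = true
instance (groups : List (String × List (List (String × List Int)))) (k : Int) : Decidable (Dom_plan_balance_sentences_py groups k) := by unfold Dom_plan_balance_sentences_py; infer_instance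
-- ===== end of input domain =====

-- B keeps the shards inside a priority queue sorted by (load, index) — pop the head,
-- grow that shard, push it back, and read the shards off in index order at the end —
-- instead of A's per-paper min(range(k), key=...) scan; measured faster in a timing run.

-- ===== PORT A =====
-- module helper _safe_sent_count (the isinstance branch is always the list branch at this type)
def pvSentCount (item : List (String × List Int)) : Int :=
  PySem.List.len ((PySem.Dict.ofList item).getD "sentences" [])

-- module helper _paper_sentence_size
def pvPaperSize (d : PySem.Dict String (List (List (String × List Int)))) (p : String) : Int :=
  (((d.get? p).getD []).map pvSentCount).sum

-- A's for-loop: i = min(range(k), key=loads.__getitem__); shards[i].append(p); loads[i] += sz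
def pvALoop (k : Int) : List (String × Int) → List (List String) → List Int → List (List String)
  | [], shards, _ => shards
  | (p, sz) :: rest, shards, loads =>
    match PySem.List.min? (PySem.List.pyRange 0 k 1) (fun j => PySem.List.pyGetD loads j 0) with
    | none => shards  -- unreachable: k ≥ 1, so range(k) is nonempty
    | some i =>
      pvALoop k rest
        (PySem.List.pySetD shards i (PySem.List.pyGetD shards i [] ++ [p]))
        (PySem.List.pySetD loads i (PySem.List.pyGetD loads i 0 + sz))

def plan_balance_sentences_py (groups : List (String × List (List (String × List Int)))) (k : Int) : List (List String) :=
  let d := PySem.Dict.ofList groups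
  let papers := d.keys
  let n := PySem.List.len papers
  let k' := max 1 (min k n)
  let sized := PySem.List.sorted (papers.map (fun p => (p, pvPaperSize d p))) (fun t => t.2) true
  pvALoop k' sized ((PySem.List.pyRange 0 k' 1).map (fun _ => ([] : List String)))
    (List.replicate k'.toNat 0)

-- ===== PORT B =====
-- Source B's tuple comparison (load, index) < (load', index')
def pvPairLt (a b : Int × Int) : Bool := a.1 < b.1 || (a.1 == b.1 && a.2 < b.2)

-- Source B's binary-search while-loop in _push (queue[mid] is always in range: 0 ≤ lo ≤ mid < hi ≤ len,
-- so pyGetD with a dummy default is exact)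
def pvFindPos (queue : List (Int × Int × List String)) (key : Int × Int) (lo hi : Nat) : Nat :=
  if lo < hi then
    let mid := (lo + hi) / 2
    let q := PySem.List.pyGetD queue (mid : Int) (0, 0, [])
    if pvPairLt (q.1, q.2.1) key then pvFindPos queue key (mid + 1) hi
    else pvFindPos queue key lo mid
  else lo
  termination_by hi - lo
  decreasing_by all_goals omega

-- Source B's _push: queue.insert(lo, entry) at the binary-searched position
def pvPush (e : Int × Int × List String) (queue : List (Int × Int × List String)) :
    List (Int × Int × List String) :=
  PySem.List.insert queue ((pvFindPos queue (e.1, e.2.1) 0 queue.length : Nat) : Int) e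

def plan_balance_sentences_py_alt (groups : List (String × List (List (String × List Int)))) (k : Int) : List (List String) :=
  let d := PySem.Dict.ofList groups
  let papers := d.keys
  let k' := max 1 (min k (PySem.List.len papers))
  let sized := PySem.List.sorted (papers.map (fun p => (p, pvPaperSize d p))) (fun t => t.2) true
  let queue0 := (PySem.List.pyRange 0 k' 1).map (fun j => ((0 : Int), j, ([] : List String)))
  let final := sized.foldl (fun queue ps =>
    match queue with
    | [] => []  -- unreachable: the queue always holds k ≥ 1 entries
    | (load, j, members) :: rest => pvPush (load + ps.2, j, members ++ [ps.1]) rest) queue0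
  (PySem.List.sorted final (fun t => t.2.1) false).map (fun t => t.2.2)

-- ===== PRECONDITION & SPEC =====
def Spec_plan_balance_sentences_py (groups : List (String × List (List (String × List Int)))) (k : Int) (out : List (List String)) : Prop := out = plan_balance_sentences_py_alt groups k
instance (groups : List (String × List (List (String × List Int)))) (k : Int) (out : List (List String)) : Decidable (Spec_plan_balance_sentences_py groups k out) := by unfold Spec_plan_balance_sentences_py; infer_instance

-- ===== CLAIM (what is proved, stated in full; the proofs are below) =====
def Claim_equal_plan_balance_sentences_py : Prop := ∀ (groups : List (String × List (List (String × List Int)))) (k : Int), Dom_plan_balance_sentences_py groups k → Spec_plan_balance_sentences_py groups k (plan_balance_sentences_py groups k)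

-- ===== LEMMAS AND PROOFS =====

-- proof-side: the (load, index) ordering on whole queue entries
def pvKeyLt (a b : Int × Int × List String) : Bool := pvPairLt (a.1, a.2.1) (b.1, b.2.1)

-- proof-side: linear insertion into a (load, index)-sorted list; pvPush coincides with it there
def pvIns (e : Int × Int × List String) :
    List (Int × Int × List String) → List (Int × Int × List String)
  | [] => [e]
  | q :: qs => if pvKeyLt q e then q :: pvIns e qs else e :: q :: qs

-- the multiset of (load, index, shard) entries the queue must hold
def pvTriples (K : Nat) (loads : List Int) (shards : List (List String)) :
    List (Int × Int × List String) :=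
  (List.range K).map (fun j => (loads.getD j 0, (j : Int), shards.getD j []))

theorem pvPairLt_trans {a b c : Int × Int}
    (h1 : pvPairLt a b = true) (h2 : pvPairLt b c = true) : pvPairLt a c = true := by
  simp only [pvPairLt, Bool.or_eq_true, decide_eq_true_eq, Bool.and_eq_true, beq_iff_eq] at *
  omega

theorem pvKeyLt_trans {a b c : Int × Int × List String}
    (h1 : pvKeyLt a b = true) (h2 : pvKeyLt b c = true) : pvKeyLt a c = true :=
  pvPairLt_trans h1 h2

theorem pvKeyLt_total {a b : Int × Int × List String}
    (h : ¬ pvKeyLt a b = true) (hne : a.2.1 ≠ b.2.1) : pvKeyLt b a = true := by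
  simp only [pvKeyLt, pvPairLt, Bool.or_eq_true, decide_eq_true_eq, Bool.and_eq_true,
    beq_iff_eq] at *
  omega

theorem pvIns_perm (e : Int × Int × List String) (qs : List (Int × Int × List String)) :
    (pvIns e qs).Perm (e :: qs) := by
  induction qs with
  | nil => simp [pvIns]
  | cons q qs ih =>
    simp only [pvIns]
    split
    · exact ((ih.cons q).trans (List.Perm.swap e q qs))
    · exact List.Perm.refl _

theorem pvIns_pairwise (e : Int × Int × List String) (qs : List (Int × Int × List String))
    (hs : List.Pairwise (fun a b => pvKeyLt a b = true) qs)
    (hne : ∀ y ∈ qs, y.2.1 ≠ e.2.1) :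
    List.Pairwise (fun a b => pvKeyLt a b = true) (pvIns e qs) := by
  induction qs with
  | nil => simp [pvIns]
  | cons q qs ih =>
    rcases List.pairwise_cons.mp hs with ⟨hq, hqs⟩
    simp only [pvIns]
    split
    · rename_i hlt
      refine List.pairwise_cons.mpr ⟨?_, ih hqs (fun y hy => hne y (List.mem_cons_of_mem _ hy))⟩
      intro y hy
      rcases List.mem_cons.mp ((pvIns_perm e qs).mem_iff.mp hy) with rfl | h
      · exact hlt
      · exact hq y h
    · rename_i hnlt
      have hel : pvKeyLt e q = true :=
        pvKeyLt_total hnlt (hne q List.mem_cons_self)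
      refine List.pairwise_cons.mpr ⟨?_, hs⟩
      intro y hy
      rcases List.mem_cons.mp hy with rfl | h
      · exact hel
      · exact pvKeyLt_trans hel (hq y h)

-- the binary search of Source B's _push finds the boundary of the ‹below key› prefix
theorem pvFindPos_spec (queue : List (Int × Int × List String)) (key : Int × Int)
    (hsort : List.Pairwise (fun a b => pvKeyLt a b = true) queue) :
    ∀ (n lo hi : Nat), hi - lo ≤ n → lo ≤ hi → hi ≤ queue.length →
    (∀ i (h : i < queue.length), i < lo → pvPairLt ((queue[i]).1, (queue[i]).2.1) key = true) →
    (∀ i (h : i < queue.length), hi ≤ i → pvPairLt ((queue[i]).1, (queue[i]).2.1) key = false) →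
    pvFindPos queue key lo hi ≤ queue.length ∧
    (∀ i (h : i < queue.length), i < pvFindPos queue key lo hi →
        pvPairLt ((queue[i]).1, (queue[i]).2.1) key = true) ∧
    (∀ i (h : i < queue.length), pvFindPos queue key lo hi ≤ i →
        pvPairLt ((queue[i]).1, (queue[i]).2.1) key = false) := by
  have hpw := List.pairwise_iff_getElem.mp hsort
  intro n
  induction n with
  | zero =>
    intro lo hi hn hlh hhi hbelow habove
    have heq : lo = hi := by omega
    rw [pvFindPos]
    rw [if_neg (by omega)]
    exact ⟨by omega, fun i h hi' => hbelow i h hi', fun i h hi' => habove i h (by omega)⟩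
  | succ n ih =>
    intro lo hi hn hlh hhi hbelow habove
    rw [pvFindPos]
    by_cases hlt : lo < hi
    · rw [if_pos hlt]
      have hmid1 : lo ≤ (lo + hi) / 2 := by omega
      have hmid2 : (lo + hi) / 2 < hi := by omega
      have hmlen : (lo + hi) / 2 < queue.length := by omega
      have hget : PySem.List.pyGetD queue (((lo + hi) / 2 : Nat) : Int) (0, 0, []) =
          queue[(lo + hi) / 2] := by
        rw [PySem.List.pyGetD_natCast, List.getD_eq_getElem _ _ hmlen]
      simp only [hget]
      by_cases hq : pvPairLt ((queue[(lo + hi) / 2]).1, (queue[(lo + hi) / 2]).2.1) key = true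
      · rw [if_pos hq]
        apply ih ((lo + hi) / 2 + 1) hi (by omega) (by omega) hhi
        · intro i h hi'
          rcases Nat.lt_or_ge i lo with hia | hia
          · exact hbelow i h hia
          · rcases Nat.eq_or_lt_of_le (Nat.le_of_lt_succ hi') with heqi | hlti
            · subst heqi; exact hq
            · exact pvPairLt_trans (hpw i ((lo + hi) / 2) h hmlen hlti) hq
        · exact habove
      · rw [if_neg hq]
        apply ih lo ((lo + hi) / 2) (by omega) (by omega) (by omega) hbelow
        intro i h hi'
        rcases Nat.eq_or_lt_of_le hi' with heqi | hlti
        · subst heqi; exact Bool.eq_false_iff.mpr hq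
        · cases hb : pvPairLt ((queue[i]).1, (queue[i]).2.1) key
          · rfl
          · exact absurd (pvPairLt_trans (hpw ((lo + hi) / 2) i hmlen h hlti) hb) hq
    · rw [if_neg hlt]
      exact ⟨by omega, fun i h hi' => hbelow i h hi', fun i h hi' => habove i h (by omega)⟩

theorem pv_take_cons_drop_eq_pvIns (e : Int × Int × List String) :
    ∀ (queue : List (Int × Int × List String)) (t : Nat), t ≤ queue.length →
    (∀ i (h : i < queue.length), i < t → pvKeyLt queue[i] e = true) →
    (∀ i (h : i < queue.length), t ≤ i → pvKeyLt queue[i] e = false) →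
    queue.take t ++ e :: queue.drop t = pvIns e queue := by
  intro queue
  induction queue with
  | nil =>
    intro t ht _ _
    have : t = 0 := by simpa using ht
    subst this
    rfl
  | cons q qs ih =>
    intro t ht hlt hge
    cases t with
    | zero =>
      have h0 : pvKeyLt q e = false := hge 0 (by simp) (by omega)
      simp [pvIns, h0]
    | succ t =>
      have h0 : pvKeyLt q e = true := hlt 0 (by simp) (by omega)
      simp only [pvIns, h0, if_true, List.take_succ_cons, List.drop_succ_cons,
        List.cons_append]
      congr 1
      apply ih t (by simpa using ht)
      · intro i h hi'
        have := hlt (i + 1) (by simpa using Nat.succ_lt_succ h) (Nat.succ_lt_succ hi')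
        simpa using this
      · intro i h hi'
        have := hge (i + 1) (by simpa using Nat.succ_lt_succ h) (Nat.succ_le_succ hi')
        simpa using this

-- on a sorted queue, Source B's binary-search insert is linear insertion
theorem pvPush_eq_pvIns (e : Int × Int × List String)
    (queue : List (Int × Int × List String))
    (hsort : List.Pairwise (fun a b => pvKeyLt a b = true) queue) :
    pvPush e queue = pvIns e queue := by
  obtain ⟨hle, hlt, hge⟩ := pvFindPos_spec queue (e.1, e.2.1) hsort queue.length 0 queue.length
    (by omega) (by omega) le_rfl (fun i h hi' => absurd hi' (by omega))
    (fun i h hi' => absurd h (by omega))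
  unfold pvPush
  rw [PySem.List.insert_natCast queue _ e hle]
  exact pv_take_cons_drop_eq_pvIns e queue _ hle hlt hge

-- min? stays at m when nothing later is strictly smaller
theorem pv_min_foldl_stay {α : Type} (key : α → Int) (m : α) :
    ∀ (post : List α), (∀ y ∈ post, ¬ key y < key m) →
      List.foldl (fun acc x => match acc with
        | none => some x
        | some m' => if key x < key m' then some x else some m') (some m) post = some m := by
  intro post
  induction post with
  | nil => intro _; rfl
  | cons y ys ih =>
    intro h
    have hy : ¬ key y < key m := h y (List.mem_cons_self)
    simp only [List.foldl_cons, if_neg hy]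
    exact ih (fun z hz => h z (List.mem_cons_of_mem _ hz))

-- min? lands on m: strictly smaller than everything before it, ≤ everything after it
theorem pv_min?_first {α : Type} (key : α → Int) (m : α) :
    ∀ (pre : List α) (post : List α) (acc : Option α),
      (acc = none ∨ ∃ a, acc = some a ∧ key m < key a) →
      (∀ y ∈ pre, key m < key y) → (∀ y ∈ post, ¬ key y < key m) →
      List.foldl (fun acc x => match acc with
        | none => some x
        | some m' => if key x < key m' then some x else some m') acc (pre ++ m :: post) = some m := by
  intro pre
  induction pre with
  | nil =>
    intro post acc hacc _ hpost
    rcases hacc with rfl | ⟨a, rfl, ha⟩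
    · simpa using pv_min_foldl_stay key m post hpost
    · simpa [if_pos ha] using pv_min_foldl_stay key m post hpost
  | cons y ys ih =>
    intro post acc hacc hpre hpost
    have hy : key m < key y := hpre y (List.mem_cons_self)
    have hpre' : ∀ z ∈ ys, key m < key z := fun z hz => hpre z (List.mem_cons_of_mem _ hz)
    rcases hacc with rfl | ⟨a, rfl, ha⟩
    · simpa using ih post (some y) (Or.inr ⟨y, rfl, hy⟩) hpre' hpost
    · simp only [List.cons_append, List.foldl_cons]
      split
      · exact ih post (some y) (Or.inr ⟨y, rfl, hy⟩) hpre' hpost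
      · exact ih post (some a) (Or.inr ⟨a, rfl, ha⟩) hpre' hpost

theorem pv_min?_eq {α : Type} (key : α → Int) (m : α) (pre post : List α)
    (hpre : ∀ y ∈ pre, key m < key y) (hpost : ∀ y ∈ post, key m ≤ key y) :
    PySem.List.min? (pre ++ m :: post) key = some m := by
  have : ∀ y ∈ post, ¬ key y < key m := fun y hy => not_lt.mpr (hpost y hy)
  simpa [PySem.List.min?] using pv_min?_first key m pre post none (Or.inl rfl) hpre this

theorem pvTriples_set (K : Nat) (loads : List Int) (shards : List (List String))
    (j : Nat) (hj : j < K) (v : Int) (w : List String)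
    (hlen : loads.length = K) (hlen2 : shards.length = K) :
    pvTriples K (loads.set j v) (shards.set j w) =
      (pvTriples K loads shards).set j (v, (j : Int), w) := by
  apply List.ext_getElem
  · simp [pvTriples]
  · intro i h1 h2
    have hiK : i < K := by simpa [pvTriples] using h1
    have hil : i < loads.length := by omega
    have his : i < shards.length := by omega
    by_cases hij : i = j
    · subst hij
      simp [pvTriples, hil, his]
    · simp [pvTriples, Ne.symm hij]

-- reading the final queue back: sorting by index recovers the shards list
theorem pv_extract (K : Nat) (loads : List Int) (shards : List (List String))
    (queue : List (Int × Int × List String))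
    (hlen2 : shards.length = K)
    (hperm : queue.Perm (pvTriples K loads shards)) :
    (PySem.List.sorted queue (fun t => t.2.1) false).map (fun t => t.2.2) = shards := by
  have hpair : (pvTriples K loads shards).Pairwise (fun a b => a.2.1 < b.2.1) := by
    simp only [pvTriples, List.pairwise_map]
    exact List.pairwise_lt_range.imp (fun {a b} h => by exact_mod_cast h)
  rw [PySem.List.sorted_eq_of_perm_of_pairwise_lt _ _ _ hperm.symm hpair]
  apply List.ext_getElem
  · simp [pvTriples, hlen2]
  · intro i h1 h2
    have hiK : i < K := by simpa [pvTriples] using h1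
    simp [pvTriples, List.getElem?_eq_getElem h2]

-- the main loop equivalence, by induction on the sorted paper list
theorem pv_loop_eq (K : Nat) (hK : 0 < K) :
    ∀ (sized : List (String × Int)) (shards : List (List String)) (loads : List Int)
      (queue : List (Int × Int × List String)),
      loads.length = K → shards.length = K →
      queue.Perm (pvTriples K loads shards) →
      List.Pairwise (fun a b => pvKeyLt a b = true) queue →
      pvALoop (K : Int) sized shards loads =
        (PySem.List.sorted
          (sized.foldl (fun queue ps =>
            match queue with
            | [] => []
            | (load, j, members) :: rest => pvPush (load + ps.2, j, members ++ [ps.1]) rest) queue)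
          (fun t => t.2.1) false).map (fun t => t.2.2) := by
  intro sized
  induction sized with
  | nil =>
    intro shards loads queue hlen hlen2 hperm _
    simpa [pvALoop] using (pv_extract K loads shards queue hlen2 hperm).symm
  | cons hd rest ih =>
    rcases hd with ⟨p, sz⟩
    intro shards loads queue hlen hlen2 hperm hpair
    cases queue with
    | nil =>
      exfalso
      have := hperm.length_eq
      simp [pvTriples] at this
      omega
    | cons hd qs =>
      rcases hd with ⟨l, j, members⟩
      have hmem : ((l, j, members) : Int × Int × List String) ∈ pvTriples K loads shards :=
        hperm.mem_iff.mp List.mem_cons_self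
      rcases List.mem_map.mp hmem with ⟨j', hj'mem, hj'eq⟩
      have hj'K : j' < K := List.mem_range.mp hj'mem
      have hl : loads.getD j' 0 = l := (Prod.mk.injEq _ _ _ _ |>.mp hj'eq).1
      have hjj : ((j' : Int) : Int) = j := ((Prod.mk.injEq _ _ _ _ |>.mp hj'eq).2 ▸ rfl : ((j' : Int), shards.getD j' []) = (j, members)) |> fun h => (Prod.mk.injEq _ _ _ _ |>.mp h).1
      have hmembers : shards.getD j' [] = members := ((Prod.mk.injEq _ _ _ _ |>.mp hj'eq).2 ▸ rfl : ((j' : Int), shards.getD j' []) = (j, members)) |> fun h => (Prod.mk.injEq _ _ _ _ |>.mp h).2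
      subst hjj
      -- every entry (loads[i], i, shards[i]) is in the queue
      have hin : ∀ i : Nat, i < K → ((loads.getD i 0, (i : Int), shards.getD i []) : Int × Int × List String) ∈
          ((l, (j' : Int), members) :: qs : List (Int × Int × List String)) := by
        intro i hi
        exact hperm.mem_iff.mpr (List.mem_map.mpr ⟨i, List.mem_range.mpr hi, rfl⟩)
      have hhead := (List.pairwise_cons.mp hpair).1
      have hmin : ∀ i : Nat, i < K → l ≤ loads.getD i 0 := by
        intro i hi
        rcases List.mem_cons.mp (hin i hi) with heq | hqs
        · exact le_of_eq ((Prod.mk.injEq _ _ _ _).mp heq).1.symm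
        · have := hhead _ hqs
          simp only [pvKeyLt, pvPairLt, Bool.or_eq_true, decide_eq_true_eq, Bool.and_eq_true,
            beq_iff_eq] at this
          rcases this with h | ⟨h, _⟩ <;> omega
      have hfirst : ∀ i : Nat, i < j' → l < loads.getD i 0 := by
        intro i hi
        rcases List.mem_cons.mp (hin i (by omega)) with heq | hqs
        · exfalso
          have : ((i : Int), shards.getD i []) = ((j' : Int), members) :=
            ((Prod.mk.injEq _ _ _ _).mp heq).2
          have : (i : Int) = (j' : Int) := ((Prod.mk.injEq _ _ _ _).mp this).1
          omega
        · have := hhead _ hqs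
          simp only [pvKeyLt, pvPairLt, Bool.or_eq_true, decide_eq_true_eq, Bool.and_eq_true,
            beq_iff_eq] at this
          rcases this with h | ⟨h, hlt⟩
          · omega
          · exfalso
            omega
      -- A's argmin over range(k) is exactly j'
      have hsplit : List.range K = List.range j' ++ j' :: List.range' (j' + 1) (K - j' - 1) := by
        rw [List.range_eq_range', List.range_eq_range']
        have h1 : List.range' 0 j' ++ List.range' (0 + 1 * j') (K - j') = List.range' 0 (j' + (K - j')) :=
          List.range'_append
        have h2 : K - j' = (K - j' - 1) + 1 := by omega
        rw [h2, List.range'_succ] at h1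
        simp only [Nat.zero_add, Nat.one_mul] at h1
        rw [show j' + (K - j' - 1 + 1) = K by omega] at h1
        exact h1.symm
      have hminq : PySem.List.min? (PySem.List.pyRange 0 (K : Int) 1)
          (fun jj => PySem.List.pyGetD loads jj 0) = some (j' : Int) := by
        rw [PySem.List.pyRange_zero_natCast, hsplit]
        simp only [List.map_append, List.map_cons]
        apply pv_min?_eq
        · intro y hy
          rcases List.mem_map.mp hy with ⟨i, hi, rfl⟩
          have hiK : i < j' := List.mem_range.mp hi
          simp only [PySem.List.pyGetD_natCast]
          exact hl ▸ hfirst i hiK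
        · intro y hy
          rcases List.mem_map.mp hy with ⟨i, hi, rfl⟩
          rcases List.mem_range'.mp hi with ⟨t, ht, rfl⟩
          simp only [PySem.List.pyGetD_natCast]
          exact hl ▸ hmin _ (by omega)
      -- one step of each loop
      simp only [pvALoop, List.foldl_cons, hminq]
      have hload : PySem.List.pyGetD loads (j' : Int) 0 = l := by
        rw [PySem.List.pyGetD_natCast, hl]
      have hshard : PySem.List.pyGetD shards (j' : Int) [] = members := by
        rw [PySem.List.pyGetD_natCast, hmembers]
      rw [hload, hshard]
      -- the set of queue indices is duplicate-free
      have hsnd : ((j' : Int) : Int) ∉ qs.map (fun t => t.2.1) := by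
        have hnd : (((l, (j' : Int), members) :: qs).map (fun t : Int × Int × List String => t.2.1)).Nodup := by
          rw [(hperm.map (fun t : Int × Int × List String => t.2.1)).nodup_iff]
          simp only [pvTriples, List.map_map, Function.comp_def]
          exact (List.nodup_range).map (fun a b h => by exact_mod_cast h)
        exact (List.nodup_cons.mp (by simpa using hnd)).1
      have hne : ∀ y ∈ qs, y.2.1 ≠ ((j' : Int) : Int) := by
        intro y hy h
        exact hsnd (h ▸ List.mem_map_of_mem hy)
      have hsetl : PySem.List.pySetD loads (j' : Int) (l + sz) = loads.set j' (l + sz) :=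
        PySem.List.pySetD_natCast loads j' (l + sz)
      have hsets : PySem.List.pySetD shards (j' : Int) (members ++ [p]) =
          shards.set j' (members ++ [p]) :=
        PySem.List.pySetD_natCast shards j' (members ++ [p])
      rw [hsetl, hsets]
      apply ih
      · simp [hlen]
      · simp [hlen2]
      · -- permutation invariant
        have hPset : pvTriples K (loads.set j' (l + sz)) (shards.set j' (members ++ [p])) =
            (pvTriples K loads shards).set j' (l + sz, (j' : Int), members ++ [p]) :=
          pvTriples_set K loads shards j' hj'K (l + sz) (members ++ [p]) hlen hlen2
        have hPlen : j' < (pvTriples K loads shards).length := by simpa [pvTriples] using hj'K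
        have hPget : (pvTriples K loads shards)[j']'hPlen = (l, (j' : Int), members) := by
          simp [pvTriples, -List.getD_eq_getElem?_getD, hl, hmembers]
        have hPdecomp : pvTriples K loads shards =
            (pvTriples K loads shards).take j' ++ (l, (j' : Int), members) :: (pvTriples K loads shards).drop (j' + 1) := by
          conv_lhs => rw [← List.set_getElem_self hPlen, hPget]
          rw [List.set_eq_take_append_cons_drop, if_pos hPlen]
        have hmid : (pvTriples K loads shards).Perm
            ((l, (j' : Int), members) :: ((pvTriples K loads shards).take j' ++ (pvTriples K loads shards).drop (j' + 1))) := by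
          conv_lhs => rw [hPdecomp]
          exact List.perm_middle
        have hqs : qs.Perm ((pvTriples K loads shards).take j' ++ (pvTriples K loads shards).drop (j' + 1)) :=
          (hperm.trans hmid).cons_inv
        have hPset2 : (pvTriples K loads shards).set j' (l + sz, (j' : Int), members ++ [p]) =
            (pvTriples K loads shards).take j' ++ (l + sz, (j' : Int), members ++ [p]) :: (pvTriples K loads shards).drop (j' + 1) := by
          rw [List.set_eq_take_append_cons_drop, if_pos hPlen]
        rw [hPset, hPset2]
        rw [pvPush_eq_pvIns _ _ (List.pairwise_cons.mp hpair).2]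
        exact (pvIns_perm _ qs).trans ((hqs.cons _).trans List.perm_middle.symm)
      · -- sortedness invariant
        rw [pvPush_eq_pvIns _ _ (List.pairwise_cons.mp hpair).2]
        exact pvIns_pairwise _ _ (List.pairwise_cons.mp hpair).2 hne

-- ===== VERDICT (by name: the statement is the Claim_ definition above) =====
theorem plan_balance_sentences_py_spec : Claim_equal_plan_balance_sentences_py := by
  intro groups k _
  unfold Spec_plan_balance_sentences_py plan_balance_sentences_py plan_balance_sentences_py_alt
  dsimp only
  set d := PySem.Dict.ofList groups with hd
  set k' := max 1 (min k (PySem.List.len d.keys)) with hk'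
  have hk1 : 1 ≤ k' := le_max_left _ _
  have hcast : ((k'.toNat : Nat) : Int) = k' := Int.toNat_of_nonneg (by omega)
  rw [← hcast, PySem.List.pyRange_zero_natCast]
  simp only [List.map_map, Function.comp_def, Int.toNat_natCast]
  apply pv_loop_eq k'.toNat (by omega)
  · simp
  · simp
  · have : pvTriples k'.toNat (List.replicate k'.toNat 0)
        ((List.range k'.toNat).map (fun _ => ([] : List String))) =
        (List.range k'.toNat).map (fun (x : Nat) => (((0 : Int), ((x : Nat) : Int), ([] : List String)) : Int × Int × List String)) := by
      unfold pvTriples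
      apply List.map_congr_left
      intro i hi
      simp
    rw [this]
  · simp only [List.pairwise_map]
    exact List.pairwise_lt_range.imp (fun {a b} h => by
      simp only [pvKeyLt, pvPairLt, Bool.or_eq_true, decide_eq_true_eq, Bool.and_eq_true, beq_iff_eq]
      exact Or.inr ⟨trivial, by exact_mod_cast h⟩)
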